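-- pv_equiv track=rewrite | github.com/nicolaierbs/bahn-giphy | bahn-connection.py | valid_train
-- ===== SOURCE A (Python) =====
-- def valid_train(stops, start_station_id, end_station_id):
--     # Is train passing through end station?
--     if not any(stop['stopId'] == end_station_id for stop in stops):
--         return False
--
--     # Is train passing first through start and then through end station?
--     for stop in stops:
--         if stop['stopId'] == start_station_id:
--             return True
--         elif stop['stopId'] == end_station_id:
--             return False
--
--     return False
-- ===== SOURCE B (Python) =====
-- def valid_train(stops, start_station_id, end_station_id):
--     pos = {}
--     i = 0
--     for s in stops:
--         pos.setdefault(s['stopId'], i)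
--         i += 1
--     if start_station_id not in pos or end_station_id not in pos:
--         return False
--     return pos[start_station_id] <= pos[end_station_id]
-- ===== Notes on version B (the rewrite author's own statement) =====
-- stated objective: alternative
-- what changed: B replaces A's two short-circuit scans (an any() pass for the end station plus an early-return loop) with one pass that builds a first-occurrence position table via setdefault and then decides by comparing the two recorded positions.
-- outside the precondition, e.g. on valid_train([{'stopId': 'e'}, {}], 'e', 'e'): A returns True, B raises KeyError
import Mathlib
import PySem

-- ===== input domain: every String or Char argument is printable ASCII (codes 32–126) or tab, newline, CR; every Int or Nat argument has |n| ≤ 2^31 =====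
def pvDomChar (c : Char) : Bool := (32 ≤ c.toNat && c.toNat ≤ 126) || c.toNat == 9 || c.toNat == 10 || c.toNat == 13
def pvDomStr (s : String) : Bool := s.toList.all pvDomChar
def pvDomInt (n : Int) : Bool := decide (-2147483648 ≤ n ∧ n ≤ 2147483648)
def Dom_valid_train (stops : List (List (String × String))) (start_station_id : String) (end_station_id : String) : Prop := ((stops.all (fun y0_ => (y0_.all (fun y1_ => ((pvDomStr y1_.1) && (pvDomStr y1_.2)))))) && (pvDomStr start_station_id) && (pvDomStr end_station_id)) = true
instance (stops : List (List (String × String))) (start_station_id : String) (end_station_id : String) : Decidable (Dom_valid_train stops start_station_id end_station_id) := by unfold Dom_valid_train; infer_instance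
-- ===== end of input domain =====

-- B replaces A's two short-circuit scans with one pass building a first-occurrence
-- position table (setdefault) and a final comparison of the two positions; same cost,
-- different structure (objective: alternative).

-- ===== PORT A =====
-- stop['stopId'] : under Pre_ the key is present, so get? is some and getD "" is exact
def pvSid (stop : List (String × String)) : String :=
  ((PySem.Dict.mk stop).get? "stopId").getD ""

-- any(stop['stopId'] == end_station_id for stop in stops)  (short-circuit)
def pvAnyEnd (stops : List (List (String × String))) (end_station_id : String) : Bool :=
  match stops with
  | [] => false
  | stop :: rest =>
    if pvSid stop = end_station_id then true else pvAnyEnd rest end_station_id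

-- the for-loop with its two early returns
def pvScan (stops : List (List (String × String))) (start_station_id : String) (end_station_id : String) : Bool :=
  match stops with
  | [] => false
  | stop :: rest =>
    if pvSid stop = start_station_id then true
    else if pvSid stop = end_station_id then false
    else pvScan rest start_station_id end_station_id

def valid_train (stops : List (List (String × String))) (start_station_id : String) (end_station_id : String) : Bool :=
  if !(pvAnyEnd stops end_station_id) then false
  else pvScan stops start_station_id end_station_id

-- ===== PORT B =====
-- for s in stops: pos.setdefault(s['stopId'], i); i += 1
def pvBuildPos (stops : List (List (String × String))) (i : Int) (pos : PySem.Dict String Int) : PySem.Dict String Int :=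
  match stops with
  | [] => pos
  | stop :: rest => pvBuildPos rest (i + 1) (pos.setdefault (pvSid stop) i)

def valid_train_alt (stops : List (List (String × String))) (start_station_id : String) (end_station_id : String) : Bool :=
  let pos := pvBuildPos stops 0 PySem.Dict.empty
  if !(pos.contains start_station_id) || !(pos.contains end_station_id) then false
  else decide (pos.getD start_station_id 0 ≤ pos.getD end_station_id 0)

-- ===== PRECONDITION & SPEC =====
-- Pre_ excludes stop lists containing a stop without the key 'stopId', on which A may
-- raise KeyError (it does unless an earlier stop already decides the result, in which
-- case A returns a value but B, which always scans the whole list, raises KeyError).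
def Pre_valid_train (stops : List (List (String × String))) (start_station_id : String) (end_station_id : String) : Prop :=
  ∀ stop ∈ stops, "stopId" ∈ stop.map Prod.fst
instance (stops : List (List (String × String))) (start_station_id : String) (end_station_id : String) : Decidable (Pre_valid_train stops start_station_id end_station_id) := by unfold Pre_valid_train; infer_instance

def pvWitness_valid_train : (List (List (String × String))) × String × String :=
  ([[("stopId", "a")], [("stopId", "b")]], "a", "b")

def Spec_valid_train (stops : List (List (String × String))) (start_station_id : String) (end_station_id : String) (out : Bool) : Prop := out = valid_train_alt stops start_station_id end_station_id
instance (stops : List (List (String × String))) (start_station_id : String) (end_station_id : String) (out : Bool) : Decidable (Spec_valid_train stops start_station_id end_station_id out) := by unfold Spec_valid_train; infer_instance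

-- ===== CLAIM (what is proved, stated in full; the proofs are below) =====
def Claim_equal_valid_train : Prop := ∀ (stops : List (List (String × String))) (start_station_id : String) (end_station_id : String), Dom_valid_train stops start_station_id end_station_id → Pre_valid_train stops start_station_id end_station_id → Spec_valid_train stops start_station_id end_station_id (valid_train stops start_station_id end_station_id)

-- ===== LEMMAS AND PROOFS =====

-- first-occurrence index of x among the stop ids
def pvFIdx (stops : List (List (String × String))) (x : String) : Option Int :=
  match stops with
  | [] => none
  | stop :: rest =>
    if pvSid stop = x then some 0 else (pvFIdx rest x).map (· + 1)

-- the common characterisation both ports are reduced to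
def pvG (stops : List (List (String × String))) (s e : String) : Bool :=
  match pvFIdx stops s, pvFIdx stops e with
  | some a, some b => decide (a ≤ b)
  | _, _ => false

theorem pvFIdx_nonneg (stops : List (List (String × String))) (x : String) (n : Int)
    (h : pvFIdx stops x = some n) : 0 ≤ n := by
  induction stops generalizing n with
  | nil => simp [pvFIdx] at h
  | cons stop rest ih =>
    simp only [pvFIdx] at h
    split_ifs at h with hx
    · simp at h; omega
    · cases hm : pvFIdx rest x with
      | none => rw [hm] at h; simp at h
      | some m => rw [hm] at h; simp at h; have := ih m hm; omega

theorem pvAnyEnd_eq_isSome (stops : List (List (String × String))) (e : String) :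
    pvAnyEnd stops e = (pvFIdx stops e).isSome := by
  induction stops with
  | nil => rfl
  | cons stop rest ih =>
    simp only [pvAnyEnd, pvFIdx]
    split_ifs with h
    · rfl
    · simpa using ih

theorem valid_train_eq_pvG (stops : List (List (String × String))) (s e : String) :
    valid_train stops s e = pvG stops s e := by
  induction stops with
  | nil => rfl
  | cons stop rest ih =>
    by_cases hs : pvSid stop = s
    · by_cases hse : s = e
      · subst hse
        simp [valid_train, pvScan, pvAnyEnd, pvG, pvFIdx, hs]
      · have he : ¬ pvSid stop = e := by rw [hs]; exact hse
        simp only [valid_train, pvScan, pvAnyEnd, pvG, pvFIdx, hs, if_true]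
        cases hfe : pvFIdx rest e with
        | none => simp [pvAnyEnd_eq_isSome, hfe, hse]
        | some b =>
          have hb := pvFIdx_nonneg rest e b hfe
          simp [pvAnyEnd_eq_isSome, hfe, hse]
          omega
    · by_cases he : pvSid stop = e
      · have hes : ¬ e = s := fun h => hs (h ▸ he)
        simp only [valid_train, pvScan, pvAnyEnd, pvG, pvFIdx, he, if_true]
        cases hfs : pvFIdx rest s with
        | none => simp [hes]
        | some a =>
          have ha := pvFIdx_nonneg rest s a hfs
          simp [hes]
          omega
      · simp only [valid_train, pvScan, pvAnyEnd, pvG, pvFIdx, hs, he, if_false] at *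
        rw [ih]
        cases hfs : pvFIdx rest s <;> cases hfe : pvFIdx rest e <;>
          simp [pvG]

theorem setdefault_of_not_contains (d : PySem.Dict String Int) (k : String) (v : Int)
    (hc : d.contains k = false) : d.setdefault k v = d.insert k v := by
  apply PySem.Dict.ext
  simp [PySem.Dict.setdefault, hc, PySem.Dict.items_insert_of_not_contains d v hc]

theorem setdefault_of_contains (d : PySem.Dict String Int) (k : String) (v : Int)
    (hc : d.contains k = true) : d.setdefault k v = d := by
  simp [PySem.Dict.setdefault, hc]

theorem get?_setdefault (d : PySem.Dict String Int) (k x : String) (v : Int) :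
    (d.setdefault k v).get? x =
      if d.contains k then d.get? x
      else if x = k then some v else d.get? x := by
  by_cases hc : d.contains k = true
  · simp [setdefault_of_contains d k v hc, hc]
  · rw [setdefault_of_not_contains d k v (by simpa using hc)]
    simp [hc, PySem.Dict.get?_insert]

theorem pvBuildPos_get? (stops : List (List (String × String))) (i : Int)
    (pos : PySem.Dict String Int) (x : String) :
    (pvBuildPos stops i pos).get? x =
      (pos.get? x).or ((pvFIdx stops x).map (fun n => i + n)) := by
  induction stops generalizing i pos with
  | nil => cases h : pos.get? x <;> simp [pvBuildPos, pvFIdx, h]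
  | cons stop rest ih =>
    simp only [pvBuildPos, pvFIdx, ih]
    rw [get?_setdefault]
    have hshift : ((pvFIdx rest x).map (fun n : Int => n + 1)).map (fun n => i + n) =
        (pvFIdx rest x).map (fun n => (i + 1) + n) := by
      cases pvFIdx rest x with
      | none => rfl
      | some n => simp; ring
    by_cases hx : pvSid stop = x
    · subst hx
      by_cases hc : pos.contains (pvSid stop) = true
      · have hsome : (pos.get? (pvSid stop)).isSome := by
          rw [← PySem.Dict.contains_eq_isSome_get? pos (pvSid stop)]; exact hc
        obtain ⟨v', hv⟩ := Option.isSome_iff_exists.mp hsome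
        simp [hc, hv]
      · have hnone : pos.get? (pvSid stop) = none := by
          cases hg : pos.get? (pvSid stop)
          · rfl
          · rw [PySem.Dict.contains_eq_isSome_get?, hg] at hc; simp at hc
        simp [hc, hnone]
    · have hxk : ¬ x = pvSid stop := fun h => hx h.symm
      by_cases hc : pos.contains (pvSid stop) = true <;>
        simp [hc, hx, hxk, hshift]

theorem valid_train_alt_eq_pvG (stops : List (List (String × String))) (s e : String) :
    valid_train_alt stops s e = pvG stops s e := by
  simp only [valid_train_alt, pvG]
  have hs := pvBuildPos_get? stops 0 PySem.Dict.empty s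
  have he := pvBuildPos_get? stops 0 PySem.Dict.empty e
  simp only [PySem.Dict.get?_empty, Option.none_or] at hs he
  have hcs := PySem.Dict.contains_eq_isSome_get? (pvBuildPos stops 0 PySem.Dict.empty) s
  have hce := PySem.Dict.contains_eq_isSome_get? (pvBuildPos stops 0 PySem.Dict.empty) e
  rw [hs] at hcs; rw [he] at hce
  cases hfs : pvFIdx stops s <;> cases hfe : pvFIdx stops e <;>
    simp_all [PySem.Dict.getD_eq_get?_getD]

-- ===== VERDICT (by name: the statement is the Claim_ definition above) =====
theorem valid_train_spec : Claim_equal_valid_train := by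
  intro stops s e _ _
  unfold Spec_valid_train
  rw [valid_train_eq_pvG, valid_train_alt_eq_pvG]
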